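-- pv_equiv track=rewrite | github.com/Tulip4attoo/coding-dojo | codefights/vs_kik_bot.py | duplicated_content_from_sender_rule
-- ===== SOURCE A (Python) =====
-- def duplicated_content_from_sender_rule(messages):
--     '''
--     as known as rule 3
--     more than 50 % of all messages had the same content, assuming that there
--     were at least 2 messages;
--     '''
--     if len(messages) < 2:
--         return 'passed'
--     else:
--         check_list = []
--         count_dict = {}
--         for message in messages:
--             text = message[0]
--             if text in check_list:
--                 if text not in count_dict:
--                     count_dict[text] = 2
--                 else:
--                     count_dict[text] += 1
--             else:
--                 check_list.append(text)
--
--         number_of_messages = len(messages)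
--         max_duplicated_content, duplicated_content = \
--             get_max_duplicated_content(count_dict)
--         if max_duplicated_content * 100 <= 50 * number_of_messages:
--             return 'passed'
--         else:
--             return 'failed: {}'.format(duplicated_content)
--
-- def get_max_duplicated_content(count_content_dict):
--     max_duplicated_content = 0
--     if len(count_content_dict) == 0:
--         return 1, 'no_text'
--     for text in count_content_dict:
--         if max_duplicated_content < count_content_dict[text]:
--             max_duplicated_content = count_content_dict[text]
--             duplicated_content = text
--     return max_duplicated_content, duplicated_content
-- ===== SOURCE B (Python) =====
-- def duplicated_content_from_sender_rule(messages):
--     '''Boyer-Moore majority vote: one O(1)-space candidate pass plus one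
--     counting pass, instead of membership lists and a count dict.'''
--     n = len(messages)
--     if n < 2:
--         return 'passed'
--     cand, votes = '', 0
--     for m in messages:
--         c = m[0]
--         if votes == 0:
--             cand, votes = c, 1
--         elif c == cand:
--             votes += 1
--         else:
--             votes -= 1
--     count = 0
--     for m in messages:
--         if m[0] == cand:
--             count += 1
--     if count * 100 <= 50 * n:
--         return 'passed'
--     return 'failed: {}'.format(cand)
-- ===== Notes on version B (the rewrite author's own statement) =====
-- stated objective: alternative
-- what changed: Replaces A's membership-list + count-dict accumulation and dict max-scan by a Boyer-Moore majority vote: one O(1)-space candidate pass plus one counting pass (valid because a 'failed' verdict requires a strict >50% majority, which is unique and must be the vote's candidate).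
import Mathlib
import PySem

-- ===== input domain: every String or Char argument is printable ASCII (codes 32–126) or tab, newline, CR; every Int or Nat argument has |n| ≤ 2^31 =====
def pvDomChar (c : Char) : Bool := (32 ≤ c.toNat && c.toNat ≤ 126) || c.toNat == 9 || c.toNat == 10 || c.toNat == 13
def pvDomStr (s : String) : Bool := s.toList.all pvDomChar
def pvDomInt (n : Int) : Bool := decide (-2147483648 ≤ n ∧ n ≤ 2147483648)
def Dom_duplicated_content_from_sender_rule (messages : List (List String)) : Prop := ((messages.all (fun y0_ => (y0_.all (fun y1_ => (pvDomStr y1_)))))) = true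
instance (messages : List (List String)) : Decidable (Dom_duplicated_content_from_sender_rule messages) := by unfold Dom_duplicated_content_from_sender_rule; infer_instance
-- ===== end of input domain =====

-- B replaces A's membership-list/dict counting by a Boyer–Moore majority
-- vote (one candidate pass + one counting pass).

-- ===== PORT A =====
-- helper get_max_duplicated_content; Python's `duplicated_content` is unbound until the
-- first update, which (all stored counts being ≥ 2 > 0) always fires at the first item,
-- so the init "" is never returned.
def pvGetMax (items : List (String × Int)) : Int × String :=
  if items.length = 0 then (1, "no_text")
  else items.foldl (fun (st : Int × String) kv => if st.1 < kv.2 then (kv.2, kv.1) else st) (0, "")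

def duplicated_content_from_sender_rule (messages : List (List String)) : String :=
  if messages.length < 2 then "passed"
  else
    let st := messages.foldl (fun (st : List String × PySem.Dict String Int) message =>
      let text := (PySem.List.pyGet? message 0).getD ""   -- message[0]; total form: Pre_ excludes empty messages
      if text ∈ st.1 then
        if st.2.contains text = false then (st.1, st.2.insert text 2)
        else (st.1, st.2.insert text (st.2.getD text 0 + 1))  -- count_dict[text] += 1 (key present in this branch)
      else (st.1 ++ [text], st.2)) ([], PySem.Dict.empty)
    let n : Int := messages.length
    let mt := pvGetMax st.2.items
    if mt.1 * 100 ≤ 50 * n then "passed"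
    else "failed: " ++ mt.2

-- ===== PORT B =====
def duplicated_content_from_sender_rule_alt (messages : List (List String)) : String :=
  let n : Int := messages.length
  if n < 2 then "passed"
  else
    let cv := messages.foldl (fun (cv : String × Int) m =>
      let c := (PySem.List.pyGet? m 0).getD ""   -- m[0]; total form: Pre_ excludes empty messages
      if cv.2 = 0 then (c, 1)
      else if c = cv.1 then (cv.1, cv.2 + 1)
      else (cv.1, cv.2 - 1)) ("", 0)
    let count := messages.foldl (fun (count : Int) m =>
      if (PySem.List.pyGet? m 0).getD "" = cv.1 then count + 1 else count) 0
    if count * 100 ≤ 50 * n then "passed"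
    else "failed: " ++ cv.1

-- ===== PRECONDITION & SPEC =====
-- Pre_ excludes only inputs where both Pythons raise IndexError on m[0]:
-- an empty inner message when there are at least two messages.
def Pre_duplicated_content_from_sender_rule (messages : List (List String)) : Prop :=
  messages.length < 2 ∨ ∀ m ∈ messages, m ≠ []
instance (messages : List (List String)) : Decidable (Pre_duplicated_content_from_sender_rule messages) := by unfold Pre_duplicated_content_from_sender_rule; infer_instance

def pvWitness_duplicated_content_from_sender_rule : List (List String) :=
  [["a", "x"], ["a"], ["b"]]

def Spec_duplicated_content_from_sender_rule (messages : List (List String)) (out : String) : Prop := out = duplicated_content_from_sender_rule_alt messages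
instance (messages : List (List String)) (out : String) : Decidable (Spec_duplicated_content_from_sender_rule messages out) := by unfold Spec_duplicated_content_from_sender_rule; infer_instance

-- ===== CLAIM (what is proved, stated in full; the proofs are below) =====
def Claim_equal_duplicated_content_from_sender_rule : Prop := ∀ (messages : List (List String)), Dom_duplicated_content_from_sender_rule messages → Pre_duplicated_content_from_sender_rule messages → Spec_duplicated_content_from_sender_rule messages (duplicated_content_from_sender_rule messages)

-- ===== LEMMAS AND PROOFS =====

-- the text of a message, as both ports read it
def pvText (m : List String) : String := (PySem.List.pyGet? m 0).getD ""

-- A's loop body over the extracted text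
def pvStepA (st : List String × PySem.Dict String Int) (text : String) : List String × PySem.Dict String Int :=
  if text ∈ st.1 then
    if st.2.contains text = false then (st.1, st.2.insert text 2)
    else (st.1, st.2.insert text (st.2.getD text 0 + 1))
  else (st.1 ++ [text], st.2)

-- B's voting loop body over the extracted text
def pvStepB (cv : String × Int) (c : String) : String × Int :=
  if cv.2 = 0 then (c, 1)
  else if c = cv.1 then (cv.1, cv.2 + 1)
  else (cv.1, cv.2 - 1)

-- invariant of A's counting loop: after processing p, the check list holds exactly
-- the seen texts and the dict maps exactly the texts of count ≥ 2 to their counts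
def pvInvA (p : List String) (st : List String × PySem.Dict String Int) : Prop :=
  (∀ c, c ∈ st.1 ↔ c ∈ p) ∧ st.2.keys.Nodup ∧
  (∀ c, c ∈ st.2.keys ↔ 2 ≤ p.count c) ∧
  (∀ c ∈ st.2.keys, st.2.getD c 0 = (p.count c : Int))

theorem pv_portA_eq (messages : List (List String)) :
    duplicated_content_from_sender_rule messages =
      (if messages.length < 2 then "passed"
       else
         if (pvGetMax ((messages.map pvText).foldl pvStepA ([], PySem.Dict.empty)).2.items).1 * 100
             ≤ 50 * (messages.length : Int) then "passed"
         else "failed: " ++ (pvGetMax ((messages.map pvText).foldl pvStepA ([], PySem.Dict.empty)).2.items).2) := by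
  unfold duplicated_content_from_sender_rule pvStepA pvText
  simp only [List.foldl_map]

theorem pv_portB_eq (messages : List (List String)) :
    duplicated_content_from_sender_rule_alt messages =
      (if (messages.length : Int) < 2 then "passed"
       else
         if ((messages.map pvText).foldl
               (fun (count : Int) c =>
                 if c = ((messages.map pvText).foldl pvStepB ("", 0)).1 then count + 1 else count) 0) * 100
             ≤ 50 * (messages.length : Int) then "passed"
         else "failed: " ++ ((messages.map pvText).foldl pvStepB ("", 0)).1) := by
  unfold duplicated_content_from_sender_rule_alt pvStepB pvText
  simp only [List.foldl_map]

theorem pv_count_append_singleton (p : List String) (t c : String) :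
    (p ++ [t]).count c = p.count c + if c = t then 1 else 0 := by
  by_cases h : c = t
  · subst h; simp [List.count_append]
  · have h0 : List.count c [t] = 0 := List.count_eq_zero.mpr (by simp [h])
    simp [List.count_append, h0, h]

theorem pvInvA_step (p : List String) (t : String) (st : List String × PySem.Dict String Int)
    (h : pvInvA p st) : pvInvA (p ++ [t]) (pvStepA st t) := by
  obtain ⟨h1, h2, h3, h4⟩ := h
  by_cases ht : t ∈ st.1
  · have htp : t ∈ p := (h1 t).mp ht
    have htc : 1 ≤ p.count t := List.one_le_count_iff.mpr htp
    have hm1 : ∀ c, c ∈ st.1 ↔ c ∈ p ++ [t] := by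
      intro c
      rw [h1 c, List.mem_append, List.mem_singleton]
      constructor
      · exact Or.inl
      · rintro (hc | rfl); exact hc; exact htp
    by_cases hc : st.2.contains t = false
    · have hnk : t ∉ st.2.keys := by
        intro hk
        exact absurd ((PySem.Dict.contains_iff_mem_keys st.2 t).mpr hk) (by simp [hc])
      have hct : p.count t = 1 := by
        have h5 : ¬ (2 ≤ p.count t) := fun hh => hnk ((h3 t).mpr hh)
        omega
      have hstep : pvStepA st t = (st.1, st.2.insert t 2) := by
        unfold pvStepA; simp [ht, hc]
      rw [hstep]
      refine ⟨hm1, PySem.Dict.nodup_keys_insert _ _ _ h2, ?_, ?_⟩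
      · intro c
        show c ∈ (st.2.insert t 2).keys ↔ _
        rw [PySem.Dict.mem_keys_insert, h3 c, pv_count_append_singleton]
        by_cases hce : c = t
        · subst hce; simp [hct]
        · simp [hce]
      · intro c hck
        replace hck : c ∈ (st.2.insert t 2).keys := hck
        show (st.2.insert t 2).getD c 0 = _
        rw [PySem.Dict.getD_insert, pv_count_append_singleton]
        by_cases hce : c = t
        · subst hce; simp [hct]
        · rw [PySem.Dict.mem_keys_insert] at hck
          rcases hck with rfl | hck
          · exact absurd rfl hce
          · simp [hce, h4 c hck]
    · have hc' : st.2.contains t = true := by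
        cases hcv : st.2.contains t
        · exact absurd hcv hc
        · rfl
      have hk : t ∈ st.2.keys := (PySem.Dict.contains_iff_mem_keys st.2 t).mp hc'
      have hct : 2 ≤ p.count t := (h3 t).mp hk
      have hstep : pvStepA st t = (st.1, st.2.insert t (st.2.getD t 0 + 1)) := by
        unfold pvStepA; simp [ht, hc']
      rw [hstep]
      refine ⟨hm1, PySem.Dict.nodup_keys_insert _ _ _ h2, ?_, ?_⟩
      · intro c
        show c ∈ (st.2.insert t (st.2.getD t 0 + 1)).keys ↔ _
        rw [PySem.Dict.mem_keys_insert, h3 c, pv_count_append_singleton]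
        by_cases hce : c = t
        · subst hce; simp [hct]; omega
        · simp [hce]
      · intro c hck
        replace hck : c ∈ (st.2.insert t (st.2.getD t 0 + 1)).keys := hck
        show (st.2.insert t (st.2.getD t 0 + 1)).getD c 0 = _
        rw [PySem.Dict.getD_insert, pv_count_append_singleton]
        by_cases hce : c = t
        · subst hce; simp [h4 _ hk]
        · rw [PySem.Dict.mem_keys_insert] at hck
          rcases hck with rfl | hck
          · exact absurd rfl hce
          · simp [hce, h4 c hck]
  · have htp : t ∉ p := fun hp => ht ((h1 t).mpr hp)
    have hct : p.count t = 0 := List.count_eq_zero.mpr htp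
    have hstep : pvStepA st t = (st.1 ++ [t], st.2) := by
      unfold pvStepA; simp [ht]
    rw [hstep]
    refine ⟨?_, h2, ?_, ?_⟩
    · intro c
      show c ∈ st.1 ++ [t] ↔ _
      simp [h1 c]
    · intro c
      show c ∈ st.2.keys ↔ _
      rw [h3 c, pv_count_append_singleton]
      by_cases hce : c = t
      · subst hce; simp [hct]
      · simp [hce]
    · intro c hck
      replace hck : c ∈ st.2.keys := hck
      show st.2.getD c 0 = _
      rw [pv_count_append_singleton]
      have hce : c ≠ t := by
        intro hh; subst hh
        have := (h3 c).mp hck; omega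
      simp [hce, h4 c hck]

theorem pvInvA_fold (l : List String) (p : List String) (st : List String × PySem.Dict String Int)
    (h : pvInvA p st) : pvInvA (p ++ l) (l.foldl pvStepA st) := by
  induction l generalizing p st with
  | nil => simpa using h
  | cons t ls ih =>
      have := ih (p ++ [t]) (pvStepA st t) (pvInvA_step p t st h)
      simpa [List.append_assoc] using this

theorem pvMaxFold (ps : List (String × Int)) (m0 : Int) (t0 : String) :
    m0 ≤ (ps.foldl (fun (st : Int × String) kv => if st.1 < kv.2 then (kv.2, kv.1) else st) (m0, t0)).1 ∧
    (∀ kv ∈ ps, kv.2 ≤ (ps.foldl (fun (st : Int × String) kv => if st.1 < kv.2 then (kv.2, kv.1) else st) (m0, t0)).1) ∧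
    ((ps.foldl (fun (st : Int × String) kv => if st.1 < kv.2 then (kv.2, kv.1) else st) (m0, t0)) = (m0, t0) ∨
      ((ps.foldl (fun (st : Int × String) kv => if st.1 < kv.2 then (kv.2, kv.1) else st) (m0, t0)).2,
       (ps.foldl (fun (st : Int × String) kv => if st.1 < kv.2 then (kv.2, kv.1) else st) (m0, t0)).1) ∈ ps) := by
  induction ps generalizing m0 t0 with
  | nil => simp
  | cons kv rest ih =>
      obtain ⟨k, v⟩ := kv
      by_cases hlt : m0 < v
      · have := ih v k
        simp only [List.foldl_cons, hlt, if_pos]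
        refine ⟨by omega, ?_, ?_⟩
        · intro kv' hkv'
          rcases List.mem_cons.mp hkv' with h | h
          · rcases h with rfl; exact this.1
          · exact this.2.1 kv' h
        · rcases this.2.2 with h | h
          · rw [h]; right; simp
          · right; right; exact h
      · have := ih m0 t0
        simp only [List.foldl_cons, hlt, if_neg, if_false]
        refine ⟨this.1, ?_, ?_⟩
        · intro kv' hkv'
          rcases List.mem_cons.mp hkv' with h | h
          · rcases h with rfl; omega
          · exact this.2.1 kv' h
        · rcases this.2.2 with h | h
          · left; exact h
          · right; right; exact h

theorem pvBM (l : List String) (p : List String) (cand : String) (votes : Int)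
    (hv : 0 ≤ votes)
    (h : ∀ x, 2 * (p.count x : Int) ≤ (p.length : Int) - votes + (if x = cand then 2 * votes else 0)) :
    0 ≤ (l.foldl pvStepB (cand, votes)).2 ∧
    ∀ x, 2 * (((p ++ l).count x : Int)) ≤ ((p ++ l).length : Int) - (l.foldl pvStepB (cand, votes)).2
      + (if x = (l.foldl pvStepB (cand, votes)).1 then 2 * (l.foldl pvStepB (cand, votes)).2 else 0) := by
  induction l generalizing p cand votes with
  | nil => simpa using ⟨hv, h⟩
  | cons c rest ih =>
      have key : ∀ (cand' : String) (votes' : Int), pvStepB (cand, votes) c = (cand', votes') →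
          0 ≤ votes' →
          (∀ x, 2 * ((p ++ [c]).count x : Int) ≤ ((p ++ [c]).length : Int) - votes' +
            (if x = cand' then 2 * votes' else 0)) →
          0 ≤ ((c :: rest).foldl pvStepB (cand, votes)).2 ∧
          ∀ x, 2 * (((p ++ c :: rest).count x : Int)) ≤ ((p ++ c :: rest).length : Int) - ((c :: rest).foldl pvStepB (cand, votes)).2
            + (if x = ((c :: rest).foldl pvStepB (cand, votes)).1 then 2 * ((c :: rest).foldl pvStepB (cand, votes)).2 else 0) := by
        intro cand' votes' hstep hv' h'
        have := ih (p ++ [c]) cand' votes' hv' h'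
        simp only [List.foldl_cons, hstep]
        simpa [List.append_assoc] using this
      by_cases h0 : votes = 0
      · subst h0
        refine key c 1 (by simp [pvStepB]) (by omega) ?_
        intro x
        have hx : 2 * ((p.count x : Int)) ≤ (p.length : Int) := by
          have := h x; split_ifs at this <;> omega
        rw [pv_count_append_singleton]
        simp only [List.length_append, List.length_cons, List.length_nil]
        push_cast
        split_ifs <;> omega
      · by_cases hcc : c = cand
        · subst hcc
          refine key c (votes + 1) (by simp [pvStepB, h0]) (by omega) ?_
          intro x
          have hx := h x
          rw [pv_count_append_singleton]
          simp only [List.length_append, List.length_cons, List.length_nil]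
          by_cases hxc : x = c
          · simp only [hxc, if_pos] at hx ⊢
            push_cast at hx ⊢; omega
          · simp only [hxc, if_neg, if_false] at hx ⊢
            push_cast at hx ⊢; omega
        · refine key cand (votes - 1) (by simp [pvStepB, h0, hcc]) (by omega) ?_
          intro x
          have hx := h x
          rw [pv_count_append_singleton]
          simp only [List.length_append, List.length_cons, List.length_nil]
          by_cases hxc2 : x = c
          · by_cases hxcand : x = cand
            · exact absurd (hxc2.symm.trans hxcand) hcc
            · rw [if_pos hxc2, if_neg hxcand]
              rw [if_neg hxcand] at hx
              push_cast at hx ⊢; omega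
          · by_cases hxcand : x = cand
            · rw [if_neg hxc2, if_pos hxcand]
              rw [if_pos hxcand] at hx
              push_cast at hx ⊢; omega
            · rw [if_neg hxc2, if_neg hxcand]
              rw [if_neg hxcand] at hx
              push_cast at hx ⊢; omega

-- ===== VERDICT (by name: the statement is the Claim_ definition above) =====
theorem duplicated_content_from_sender_rule_spec : Claim_equal_duplicated_content_from_sender_rule := by
  intro messages _ _
  unfold Spec_duplicated_content_from_sender_rule
  rw [pv_portA_eq, pv_portB_eq]
  by_cases hlen : messages.length < 2
  · rw [if_pos hlen, if_pos (by exact_mod_cast hlen)]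
  · have hn : 2 ≤ messages.length := by omega
    rw [if_neg hlen, if_neg (show ¬ ((messages.length : Int) < 2) by omega)]
    set l := messages.map pvText with hl
    have hlenl : l.length = messages.length := by simp [hl]
    have hInv : pvInvA l (l.foldl pvStepA ([], PySem.Dict.empty)) := by
      have h0 : pvInvA [] (([], PySem.Dict.empty) : List String × PySem.Dict String Int) :=
        ⟨by simp, by simp [PySem.Dict.keys_empty], by simp [PySem.Dict.keys_empty],
         by simp [PySem.Dict.keys_empty]⟩
      simpa using pvInvA_fold l [] _ h0
    obtain ⟨hA1, hA2, hA3, hA4⟩ := hInv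
    set st := l.foldl pvStepA ([], PySem.Dict.empty) with hst
    have hBM := pvBM l [] "" 0 le_rfl (by intro x; by_cases hx : x = "" <;> simp [hx])
    simp only [List.nil_append] at hBM
    set cv := l.foldl pvStepB ("", 0) with hcv
    have hcor : ∀ x, x ≠ cv.1 → 2 * (l.count x : Int) ≤ (l.length : Int) := by
      intro x hx
      have h2 := hBM.2 x
      rw [if_neg hx] at h2
      have h1 := hBM.1
      omega
    have hcnt : (l.foldl (fun (count : Int) c => if c = cv.1 then count + 1 else count) 0)
        = (l.count cv.1 : Int) := by
      rw [show (fun (count : Int) c => if c = cv.1 then count + 1 else count)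
            = (fun (acc : Int) x => if (fun c => decide (c = cv.1)) x = true then acc + 1 else acc) from by
          funext acc x; simp]
      rw [PySem.List.foldl_count_if]
      simp only [List.count, zero_add, Nat.cast_inj]
      exact List.countP_congr (fun a _ => by simp)
    rw [hcnt]
    have hitems : st.2.items = st.2.keys.map (fun k => (k, st.2.getD k 0)) :=
      PySem.Dict.items_eq_map_keys st.2 hA2 0
    by_cases hks : st.2.keys = []
    · have hempty : pvGetMax st.2.items = (1, "no_text") := by
        rw [hitems, hks]; rfl
      rw [hempty]
      have hcv1 : l.count cv.1 ≤ 1 := by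
        by_contra hcc
        exact (by simp [hks] : cv.1 ∉ st.2.keys) ((hA3 cv.1).mpr (by omega))
      rw [if_pos (show ((1, "no_text") : Int × String).1 * 100 ≤ 50 * (messages.length : Int) by
            simp; omega),
          if_pos (show ((l.count cv.1 : Int)) * 100 ≤ 50 * (messages.length : Int) by omega)]
    · obtain ⟨k0, hk0⟩ := List.exists_mem_of_ne_nil _ hks
      have hitems_len : ¬ st.2.items.length = 0 := by
        rw [hitems, List.length_map]
        intro hh; exact hks (List.length_eq_zero_iff.mp hh)
      obtain ⟨hm0, hub, hsel⟩ := pvMaxFold st.2.items 0 ""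
      set mt := st.2.items.foldl
        (fun (st : Int × String) kv => if st.1 < kv.2 then (kv.2, kv.1) else st) (0, "") with hmt
      have hgm : pvGetMax st.2.items = mt := by
        unfold pvGetMax; rw [if_neg hitems_len]
      rw [hgm]
      have hubk : ∀ k ∈ st.2.keys, (l.count k : Int) ≤ mt.1 := by
        intro k hk
        have hmem : (k, st.2.getD k 0) ∈ st.2.items := by
          rw [hitems]; exact List.mem_map_of_mem hk
        have := hub _ hmem
        rwa [hA4 k hk] at this
      rcases hsel with hsel | hsel
      · exfalso
        have hk0c : 2 ≤ l.count k0 := (hA3 k0).mp hk0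
        have hb := hubk k0 hk0
        rw [hsel] at hb
        simp at hb; omega
      · rw [hitems] at hsel
        obtain ⟨k, hk, hkeq⟩ := List.mem_map.mp hsel
        injection hkeq with e1 e2
        subst e1
        have hmtval : mt.1 = (l.count mt.2 : Int) := by rw [← e2, hA4 _ hk]
        by_cases hpass : mt.1 * 100 ≤ 50 * (messages.length : Int)
        · rw [if_pos hpass]
          have hbcnt : ((l.count cv.1 : Int)) * 100 ≤ 50 * (messages.length : Int) := by
            by_cases h2c : 2 ≤ l.count cv.1
            · have := hubk cv.1 ((hA3 cv.1).mpr h2c)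
              omega
            · omega
          rw [if_pos hbcnt]
        · rw [if_neg hpass]
          have heq : mt.2 = cv.1 := by
            by_contra hne
            have hc := hcor mt.2 hne
            rw [hlenl] at hc
            omega
          have hbfail : ¬ (((l.count cv.1 : Int)) * 100 ≤ 50 * (messages.length : Int)) := by
            rw [← heq, ← hmtval]
            omega
          rw [if_neg hbfail, heq]
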